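-- pv_equiv track=rewrite | github.com/shourjoguha/Gainsly | app/services/program.py | _has_pattern_conflict
-- ===== SOURCE A (Python) =====
-- def _has_pattern_conflict(
--
--     pattern: str,
--     current_day: int,
--     used_main_patterns: dict[int, list[str]],
-- ) -> bool:
--     """
--     Check if a pattern conflicts with interference rules.
--
--     Args:
--         pattern: Pattern to check (e.g., "squat")
--         current_day: Current day number
--         used_main_patterns: Dict of day -> patterns used
--
--     Returns:
--         True if pattern conflicts with interference rules
--     """
--     # Rule 1: No same pattern on consecutive training days
--     prev_day = current_day - 1
--     if prev_day in used_main_patterns: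
--         prev_patterns = used_main_patterns[prev_day][:2]  # Main patterns only
--         if pattern in prev_patterns:
--             return True
--
--     # Rule 2: No same pattern within 2 days (even with rest day between)
--     for check_day in range(max(1, current_day - 2), current_day):
--         if check_day in used_main_patterns:
--             check_patterns = used_main_patterns[check_day][:2]
--             if pattern in check_patterns:
--                 return True
--
--     # Rule 3: Limit pattern usage to max 2 times per week (7 days)
--     pattern_count = 0
--     week_start = max(1, current_day - 6)
--     for check_day in range(week_start, current_day + 1):
--         if check_day in used_main_patterns:
--             check_patterns = used_main_patterns[check_day][:2]
--             if pattern in check_patterns: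
--                 pattern_count += 1
--
--     if pattern_count >= 2:  # Already used twice this week
--         return True
--
--     return False
-- ===== SOURCE B (Python) =====
-- def _has_pattern_conflict(pattern, current_day, used_main_patterns):
--     # One data-driven pass over the dict: for each day whose first two (main)
--     # patterns contain `pattern`, update two accumulators — a "recent" flag
--     # (covers A's Rules 1 and 2: day current_day-1, or a clamped day within the
--     # previous two days) and a 7-day-window usage count (Rule 3).  Correct
--     # because each rule only asks whether/how often matching days fall in a
--     # fixed day interval, which commutes with a single scan of the entries.
--     recent = False
--     week_count = 0
--     for d, pats in used_main_patterns.items():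
--         if pattern not in pats[:2]:
--             continue
--         if d == current_day - 1 or max(1, current_day - 2) <= d < current_day:
--             recent = True
--         if max(1, current_day - 6) <= d <= current_day:
--             week_count += 1
--     return recent or week_count >= 2
-- ===== Notes on version B (the rewrite author's own statement) =====
-- stated objective: alternative
-- what changed: B fuses A's three staged day-range scans (each re-probing the dict per day) into a single pass over the dict's entries that maintains two accumulators: a recent-use flag covering Rules 1-2 and a 7-day usage count for Rule 3.
import Mathlib
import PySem

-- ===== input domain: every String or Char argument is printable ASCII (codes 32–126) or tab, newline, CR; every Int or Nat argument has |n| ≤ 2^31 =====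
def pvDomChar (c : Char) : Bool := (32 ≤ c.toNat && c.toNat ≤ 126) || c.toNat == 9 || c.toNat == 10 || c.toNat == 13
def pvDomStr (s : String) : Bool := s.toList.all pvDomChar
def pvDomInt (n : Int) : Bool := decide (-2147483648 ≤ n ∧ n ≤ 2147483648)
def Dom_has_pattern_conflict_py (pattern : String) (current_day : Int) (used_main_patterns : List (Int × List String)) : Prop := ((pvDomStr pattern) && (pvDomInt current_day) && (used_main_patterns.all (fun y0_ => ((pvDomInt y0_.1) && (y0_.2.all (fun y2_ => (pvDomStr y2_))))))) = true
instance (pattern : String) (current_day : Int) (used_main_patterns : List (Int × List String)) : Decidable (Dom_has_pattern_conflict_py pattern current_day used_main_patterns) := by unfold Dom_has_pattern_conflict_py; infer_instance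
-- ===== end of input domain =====

-- B replaces A's three staged day-range scans by a single pass over the dict's entries
-- maintaining a recent-use flag and a 7-day usage count; same result, proved equal on all inputs.

-- ===== PORT A =====
-- dict lookup on the association list = first match (the convention's dict semantics)
def has_pattern_conflict_py (pattern : String) (current_day : Int) (used_main_patterns : List (Int × List String)) : Bool :=
  -- Rule 1
  let prev_day := current_day - 1
  let r1 : Bool :=
    match List.lookup prev_day used_main_patterns with
    | some ps => (PySem.List.slice ps none (some 2)).contains pattern
    | none => false
  if r1 then true
  else
    -- Rule 2
    let r2 : Bool := (PySem.List.pyRange (max 1 (current_day - 2)) current_day 1).any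
      (fun check_day =>
        match List.lookup check_day used_main_patterns with
        | some ps => (PySem.List.slice ps none (some 2)).contains pattern
        | none => false)
    if r2 then true
    else
      -- Rule 3
      let week_start := max 1 (current_day - 6)
      let pattern_count : Int := (PySem.List.pyRange week_start (current_day + 1) 1).foldl
        (fun acc check_day =>
          match List.lookup check_day used_main_patterns with
          | some ps => if (PySem.List.slice ps none (some 2)).contains pattern then acc + 1 else acc
          | none => acc) 0
      decide (2 ≤ pattern_count)

-- ===== PORT B =====
-- dict .items() under the assoc-list convention: one entry per key, first occurrence wins
def pvItemsFirst (seen : List Int) : List (Int × List String) → List (Int × List String)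
  | [] => []
  | p :: rest =>
    if seen.contains p.1 then pvItemsFirst seen rest
    else p :: pvItemsFirst (p.1 :: seen) rest

def has_pattern_conflict_py_alt (pattern : String) (current_day : Int) (used_main_patterns : List (Int × List String)) : Bool :=
  -- one pass over the items with two accumulators (recent, week_count)
  let res : Bool × Int := (pvItemsFirst [] used_main_patterns).foldl
    (fun st p =>
      if (PySem.List.slice p.2 none (some 2)).contains pattern then
        let recent := st.1 ||
          (decide (p.1 = current_day - 1) ||
            (decide (max 1 (current_day - 2) ≤ p.1) && decide (p.1 < current_day)))
        let cnt : Int :=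
          if decide (max 1 (current_day - 6) ≤ p.1) && decide (p.1 ≤ current_day)
          then st.2 + 1 else st.2
        (recent, cnt)
      else st) (false, 0)
  res.1 || decide (2 ≤ res.2)

-- ===== PRECONDITION & SPEC =====
def Spec_has_pattern_conflict_py (pattern : String) (current_day : Int) (used_main_patterns : List (Int × List String)) (out : Bool) : Prop := out = has_pattern_conflict_py_alt pattern current_day used_main_patterns
instance (pattern : String) (current_day : Int) (used_main_patterns : List (Int × List String)) (out : Bool) : Decidable (Spec_has_pattern_conflict_py pattern current_day used_main_patterns out) := by unfold Spec_has_pattern_conflict_py; infer_instance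

-- ===== CLAIM (what is proved, stated in full; the proofs are below) =====
def Claim_equal_has_pattern_conflict_py : Prop := ∀ (pattern : String) (current_day : Int) (used_main_patterns : List (Int × List String)), Dom_has_pattern_conflict_py pattern current_day used_main_patterns → Spec_has_pattern_conflict_py pattern current_day used_main_patterns (has_pattern_conflict_py pattern current_day used_main_patterns)

-- ===== LEMMAS AND PROOFS =====

-- A's per-day test, as a function of the day
def pvHit (pattern : String) (upm : List (Int × List String)) (d : Int) : Bool :=
  match List.lookup d upm with
  | some ps => (PySem.List.slice ps none (some 2)).contains pattern
  | none => false

-- per-item hit test (B's guard)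
def pvHitP (pattern : String) (p : Int × List String) : Bool :=
  (PySem.List.slice p.2 none (some 2)).contains pattern

theorem pvItemsFirst_not_mem (l : List (Int × List String)) (seen : List Int)
    (p : Int × List String) (h : seen.contains p.1 = true) : p ∉ pvItemsFirst seen l := by
  induction l generalizing seen with
  | nil => simp [pvItemsFirst]
  | cons q rest ih =>
    simp only [pvItemsFirst]
    split
    · exact ih seen h
    · intro hm
      rcases List.mem_cons.1 hm with rfl | hm
      · rename_i hc; rw [h] at hc; exact absurd rfl hc
      · exact ih (q.1 :: seen) (by simp only [List.contains_cons]; simp at h ⊢; exact Or.inr h) hm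

theorem pvItemsFirst_lookup (l : List (Int × List String)) (seen : List Int)
    (d : Int) (ps : List String) (h : seen.contains d = false) :
    ((d, ps) ∈ pvItemsFirst seen l ↔ List.lookup d l = some ps) := by
  induction l generalizing seen with
  | nil => simp [pvItemsFirst]
  | cons q rest ih =>
    obtain ⟨k, v⟩ := q
    simp only [pvItemsFirst]
    by_cases hdk : d = k
    · subst hdk
      simp only [h, Bool.false_eq_true, if_false, List.lookup, BEq.rfl]
      constructor
      · intro hm
        rcases List.mem_cons.1 hm with heq | hm
        · injection heq with h1 h2; rw [h2]
        · exact absurd hm (pvItemsFirst_not_mem rest (d :: seen) (d, ps) (by simp))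
      · intro hv
        have hps : v = ps := by injection hv
        subst hps; simp
    · have hl : List.lookup d ((k, v) :: rest) = List.lookup d rest := by
        simp [List.lookup, beq_eq_false_iff_ne.2 hdk]
      rw [hl]
      split
      · exact ih seen h
      · rw [List.mem_cons]
        constructor
        · rintro (heq | hm)
          · exact absurd (congrArg Prod.fst heq) (by simpa using hdk)
          · exact (ih (k :: seen) (by simp only [List.contains_cons]; simp at h ⊢; exact ⟨fun he => hdk he, h⟩)).1 hm
        · intro hlk
          exact Or.inr ((ih (k :: seen) (by simp only [List.contains_cons]; simp at h ⊢; exact ⟨fun he => hdk he, h⟩)).2 hlk)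

-- the deduplicated items list has distinct keys
theorem pvItemsFirst_keys_nodup (l : List (Int × List String)) (seen : List Int) :
    ((pvItemsFirst seen l).map Prod.fst).Nodup ∧
      ∀ p ∈ pvItemsFirst seen l, seen.contains p.1 = false := by
  induction l generalizing seen with
  | nil => simp [pvItemsFirst]
  | cons q rest ih =>
    simp only [pvItemsFirst]
    split
    · exact ih seen
    · rename_i hq
      obtain ⟨hnd, hall⟩ := ih (q.1 :: seen)
      refine ⟨?_, ?_⟩
      · simp only [List.map_cons, List.nodup_cons]
        refine ⟨?_, hnd⟩
        intro hm
        rcases List.mem_map.1 hm with ⟨p, hp, hkey⟩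
        have := hall p hp
        simp only [List.contains_cons] at this
        simp at this
        exact this.1 hkey
      · intro p hp
        rcases List.mem_cons.1 hp with rfl | hp
        · simpa using hq
        · have := hall p hp
          simp only [List.contains_cons] at this
          simp at this
          simpa using this.2

-- B's fold, characterized: any-flag and a count over the traversed items
theorem pvFoldB (pattern : String) (R W : Int → Bool) (l : List (Int × List String))
    (r : Bool) (c : Int) :
    l.foldl
      (fun (st : Bool × Int) p =>
        if pvHitP pattern p then
          (st.1 || R p.1, if W p.1 then st.2 + 1 else st.2)
        else st) (r, c)
      = (r || l.any (fun p => pvHitP pattern p && R p.1),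
         c + (l.countP (fun p => pvHitP pattern p && W p.1) : Int)) := by
  induction l generalizing r c with
  | nil => simp
  | cons x xs ih =>
    simp only [List.foldl_cons, List.any_cons, List.countP_cons]
    by_cases hx : pvHitP pattern x = true
    · rw [if_pos hx, ih]
      by_cases hw : W x.1 = true
      · simp [hx, hw, Bool.or_assoc]; ring
      · simp [hx, hw, Bool.or_assoc]
    · rw [if_neg hx, ih]
      simp [hx]

-- an item of the deduped list is exactly a successful first-match lookup
theorem pvItem_hit (pattern : String) (upm : List (Int × List String)) (Q : Int → Bool) :
    ((pvItemsFirst [] upm).any (fun p => pvHitP pattern p && Q p.1) = true)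
      ↔ ∃ d, pvHit pattern upm d = true ∧ Q d = true := by
  rw [List.any_eq_true]
  constructor
  · rintro ⟨⟨d, ps⟩, hm, hq⟩
    simp only [Bool.and_eq_true] at hq
    have hlk := (pvItemsFirst_lookup upm [] d ps (by simp)).1 hm
    exact ⟨d, by simp [pvHit, hlk]; exact (by simpa [pvHitP] using hq.1), hq.2⟩
  · rintro ⟨d, hh, hq⟩
    unfold pvHit at hh
    cases hlk : List.lookup d upm with
    | none => rw [hlk] at hh; simp at hh
    | some ps =>
      rw [hlk] at hh
      exact ⟨(d, ps), (pvItemsFirst_lookup upm [] d ps (by simp)).2 hlk,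
        by simp [pvHitP]; exact ⟨by simpa using hh, hq⟩⟩

-- the count over deduped items = the count over the matching days of a range-free index
theorem pvItem_count (pattern : String) (upm : List (Int × List String)) (W : Int → Bool) :
    (pvItemsFirst [] upm).countP (fun p => pvHitP pattern p && W p.1)
      = (((pvItemsFirst [] upm).map Prod.fst).filter
          (fun d => pvHit pattern upm d && W d)).length := by
  rw [List.countP_eq_length_filter]
  have : ∀ p ∈ pvItemsFirst [] upm,
      (pvHitP pattern p && W p.1) = (pvHit pattern upm p.1 && W p.1) := by
    rintro ⟨d, ps⟩ hm
    have hlk := (pvItemsFirst_lookup upm [] d ps (by simp)).1 hm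
    simp [pvHitP, pvHit, hlk]
  rw [List.filter_congr this]
  conv_rhs => rw [List.filter_map]
  rw [List.length_map]
  rfl

-- A's range-count equals the count over the deduped keys, for the window predicate
theorem pvCount_eq (pattern : String) (upm : List (Int × List String)) (lo hi : Int) :
    (PySem.List.pyRange lo hi 1).countP (pvHit pattern upm)
      = (((pvItemsFirst [] upm).map Prod.fst).filter
          (fun d => pvHit pattern upm d && (decide (lo ≤ d) && decide (d < hi)))).length := by
  rw [List.countP_eq_length_filter]
  apply List.Perm.length_eq
  rw [List.perm_ext_iff_of_nodup (List.Nodup.filter _ (PySem.List.nodup_pyRange_one lo hi))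
    (List.Nodup.filter _ (pvItemsFirst_keys_nodup upm []).1)]
  intro a
  simp only [List.mem_filter, PySem.List.mem_pyRange_one, List.mem_map]
  constructor
  · rintro ⟨⟨h1, h2⟩, h3⟩
    refine ⟨?_, by simp [h1, h2, h3]⟩
    unfold pvHit at h3
    cases hlk : List.lookup a upm with
    | none => rw [hlk] at h3; simp at h3
    | some ps => exact ⟨(a, ps), (pvItemsFirst_lookup upm [] a ps (by simp)).2 hlk, rfl⟩
  · rintro ⟨_, hr⟩
    simp only [Bool.and_eq_true, decide_eq_true_eq] at hr
    exact ⟨⟨hr.2.1, hr.2.2⟩, hr.1⟩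

theorem pvFoldl_count (P : Int → Bool) (l : List Int) (acc : Int) :
    l.foldl (fun acc d => if P d then acc + 1 else acc) acc = acc + l.countP P := by
  induction l generalizing acc with
  | nil => simp
  | cons x xs ih =>
    simp only [List.foldl_cons, List.countP_cons, ih]
    by_cases h : P x = true
    · simp [h]; ring
    · simp [h]

-- ===== VERDICT (by name: the statement is the Claim_ definition above) =====
theorem has_pattern_conflict_py_spec : Claim_equal_has_pattern_conflict_py := by
  intro pattern cd upm _
  unfold Spec_has_pattern_conflict_py has_pattern_conflict_py has_pattern_conflict_py_alt
  -- name the predicates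
  have hIf : ∀ a b c : Bool, (if a then true else if b then true else c) = (a || b || c) := by
    decide
  let R : Int → Bool := fun d =>
    decide (d = cd - 1) || (decide (max 1 (cd - 2) ≤ d) && decide (d < cd))
  let W : Int → Bool := fun d =>
    decide (max 1 (cd - 6) ≤ d) && decide (d ≤ cd)
  -- B's fold result
  have hfold :
      (pvItemsFirst [] upm).foldl
        (fun (st : Bool × Int) p =>
          if (PySem.List.slice p.2 none (some 2)).contains pattern then
            (st.1 ||
              (decide (p.1 = cd - 1) ||
                (decide (max 1 (cd - 2) ≤ p.1) && decide (p.1 < cd))),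
             if decide (max 1 (cd - 6) ≤ p.1) && decide (p.1 ≤ cd) then st.2 + 1 else st.2)
          else st) (false, 0)
        = (false || (pvItemsFirst [] upm).any (fun p => pvHitP pattern p && R p.1),
           (0 : Int) + ((pvItemsFirst [] upm).countP (fun p => pvHitP pattern p && W p.1) : Int)) := by
    rw [← pvFoldB pattern R W (pvItemsFirst [] upm) false 0]
    rfl
  simp only [hfold, Bool.false_or, zero_add]
  -- A's shape: r1 || r2 || decide (2 ≤ count)
  have hr12 : ((match List.lookup (cd - 1) upm with
        | some ps => (PySem.List.slice ps none (some 2)).contains pattern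
        | none => false)
      || (PySem.List.pyRange (max 1 (cd - 2)) cd 1).any
          (fun check_day =>
            match List.lookup check_day upm with
            | some ps => (PySem.List.slice ps none (some 2)).contains pattern
            | none => false))
      = (pvItemsFirst [] upm).any (fun p => pvHitP pattern p && R p.1) := by
    rw [Bool.eq_iff_iff, Bool.or_eq_true, List.any_eq_true, pvItem_hit]
    constructor
    · rintro (h1 | ⟨d, hd, hh⟩)
      · exact ⟨cd - 1, h1, by simp [R]⟩
      · rw [PySem.List.mem_pyRange_one] at hd
        exact ⟨d, hh, by simp [R]; omega⟩
    · rintro ⟨d, hh, hq⟩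
      simp only [R, Bool.or_eq_true, Bool.and_eq_true, decide_eq_true_eq] at hq
      rcases hq with rfl | ⟨h1, h2⟩
      · exact Or.inl (by simpa [pvHit] using hh)
      · exact Or.inr ⟨d, PySem.List.mem_pyRange_one.2 ⟨h1, h2⟩, by simpa [pvHit] using hh⟩
  have hcnt : ((PySem.List.pyRange (max 1 (cd - 6)) (cd + 1) 1).foldl
        (fun acc check_day =>
          match List.lookup check_day upm with
          | some ps => if (PySem.List.slice ps none (some 2)).contains pattern then acc + 1 else acc
          | none => acc) (0 : Int))
      = ((pvItemsFirst [] upm).countP (fun p => pvHitP pattern p && W p.1) : Int) := by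
    have hb : (fun (acc : Int) check_day =>
        match List.lookup check_day upm with
        | some ps => if (PySem.List.slice ps none (some 2)).contains pattern then acc + 1 else acc
        | none => acc) = (fun acc d => if pvHit pattern upm d then acc + 1 else acc) := by
      funext acc d
      unfold pvHit
      cases List.lookup d upm <;> simp
    rw [hb, pvFoldl_count, zero_add, pvCount_eq pattern upm (max 1 (cd - 6)) (cd + 1),
      pvItem_count pattern upm W]
    congr 1
    congr 1
    apply List.filter_congr
    intro d _
    have hd : decide (d < cd + 1) = decide (d ≤ cd) := by rw [decide_eq_decide]; omega
    rw [hd]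
  rw [hIf, hr12, hcnt]
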